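-- pv_equiv track=rewrite | github.com/KajaBraz/AdventOfCode2024 | day15/solution_part_2.py | get_all_to_move
-- ===== SOURCE A (Python) =====
-- import typing
--
-- def get_all_to_move(data: typing.List[typing.List[str]], i: int, j: int, step: str) -> typing.Set[
--     typing.Tuple[int, int]]:
--     to_move = get_pair(data, i, j)
--     togo = {p for p in to_move}
--     while togo:
--         x, y = togo.pop()
--         next_pair = get_next(data, x, y, step)
--         to_move |= next_pair
--         togo |= next_pair
--     return to_move
--
-- def get_pair(data: typing.List[typing.List[str]], i: int, j: int) -> typing.Set[typing.Tuple[int, int]]: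
--     if data[i][j] == '[':
--         return {(i, j), (i, j + 1)}
--     if data[i][j] == ']':
--         return {(i, j), (i, j - 1)}
--     return set()
--
-- def get_lower(data: typing.List[typing.List[str]], i: int, j: int) -> typing.Set[typing.Tuple[int, int]]:
--     if data[i + 1][j] in {'[', ']'}:
--         return get_pair(data, i + 1, j)
--     return set()
--
-- def get_upper(data: typing.List[typing.List[str]], i: int, j: int) -> typing.Set[typing.Tuple[int, int]]:
--     if data[i - 1][j] in {'[', ']'}:
--         return get_pair(data, i - 1, j)
--     return set()
--
-- def get_next(data: typing.List[typing.List[str]], i: int, j: int, step: str) -> typing.Set[typing.Tuple[int, int]]: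
--     if step == 'v':
--         return get_lower(data, i, j)
--     if step == '^':
--         return get_upper(data, i, j)
--     return set()
-- ===== SOURCE B (Python) =====
-- import typing
--
-- def get_all_to_move(data: typing.List[typing.List[str]], i: int, j: int, step: str) -> typing.Set[
--     typing.Tuple[int, int]]:
--     # Recursive depth-first search with a visited guard instead of A's togo worklist.
--     if step == 'v':
--         d = 1
--     elif step == '^':
--         d = -1
--     else:
--         d = 0
--
--     def pair(x, y):
--         c = data[x][y]
--         if c == '[':
--             return [(x, y), (x, y + 1)]
--         if c == ']':
--             return [(x, y), (x, y - 1)]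
--         return []
--
--     acc = []
--
--     def dfs(cell):
--         if cell in acc:
--             return
--         acc.append(cell)
--         if d != 0:
--             for nb in pair(cell[0] + d, cell[1]):
--                 dfs(nb)
--
--     for c in pair(i, j):
--         dfs(c)
--     return set(acc)
-- ===== Notes on version B (the rewrite author's own statement) =====
-- stated objective: alternative
-- what changed: Replaces A's iterative togo-worklist loop (pop a cell, union its pushed pair into two sets, repeat until the worklist drains) by a recursive depth-first search with a visited guard: each newly discovered box cell immediately recurses into the pair it pushes, accumulating one visited list that is returned as the set.
-- outside the precondition, e.g. on get_all_to_move([['[', ']'], ['.', '.']], 0, 0, 'v'): A returns {(0, 1), (0, 0)}, B returns {(0, 1), (0, 0)}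
import Mathlib
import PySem

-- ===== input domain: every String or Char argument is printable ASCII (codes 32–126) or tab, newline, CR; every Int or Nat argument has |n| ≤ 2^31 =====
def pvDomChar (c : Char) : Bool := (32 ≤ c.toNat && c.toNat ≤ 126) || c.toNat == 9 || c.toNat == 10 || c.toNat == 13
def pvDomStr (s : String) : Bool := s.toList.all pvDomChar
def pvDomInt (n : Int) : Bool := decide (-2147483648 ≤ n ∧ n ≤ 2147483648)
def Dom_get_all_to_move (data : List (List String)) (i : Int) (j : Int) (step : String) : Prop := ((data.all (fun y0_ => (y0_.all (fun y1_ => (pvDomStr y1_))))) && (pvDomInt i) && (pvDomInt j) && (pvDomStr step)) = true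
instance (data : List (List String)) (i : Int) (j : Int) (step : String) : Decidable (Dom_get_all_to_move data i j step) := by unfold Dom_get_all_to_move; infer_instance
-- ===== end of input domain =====

-- B replaces A's iterative 'togo'-worklist loop by a recursive depth-first search with a
-- visited guard (alternative decomposition; same returned set). The Python function returns
-- a SET (no order, and set.pop's order is not modelled): both ports present that set in
-- ascending (row, column) order, its canonical representation.

-- canonical representation of the returned Python set (shared by both ports)
def sortPairs (l : List (Int × Int)) : List (Int × Int) :=
  PySem.List.sorted l (fun p => (toLex p : Lex (Int × Int))) false

-- ===== PORT A =====
def get_pairL (data : List (List String)) (i : Int) (j : Int) : List (Int × Int) :=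
  if PySem.List.pyGetD (PySem.List.pyGetD data i []) j "" = "[" then [(i, j), (i, j + 1)]
  else if PySem.List.pyGetD (PySem.List.pyGetD data i []) j "" = "]" then [(i, j), (i, j - 1)]
  else []

def get_lowerL (data : List (List String)) (i : Int) (j : Int) : List (Int × Int) :=
  if PySem.List.pyGetD (PySem.List.pyGetD data (i + 1) []) j "" = "[" ∨
     PySem.List.pyGetD (PySem.List.pyGetD data (i + 1) []) j "" = "]" then
    get_pairL data (i + 1) j
  else []

def get_upperL (data : List (List String)) (i : Int) (j : Int) : List (Int × Int) :=
  if PySem.List.pyGetD (PySem.List.pyGetD data (i - 1) []) j "" = "[" ∨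
     PySem.List.pyGetD (PySem.List.pyGetD data (i - 1) []) j "" = "]" then
    get_pairL data (i - 1) j
  else []

def get_nextL (data : List (List String)) (i : Int) (j : Int) (step : String) : List (Int × Int) :=
  if step = "v" then get_lowerL data i j
  else if step = "^" then get_upperL data i j
  else []

-- 'while togo: x, y = togo.pop(); …', with a fuel bound large enough for every input
-- admitted by Pre_ (proved below); the pop takes the oldest element of the set.
def loopA (data : List (List String)) (step : String) : Nat → List (Int × Int) → List (Int × Int) → List (Int × Int)
  | 0, to_move, _ => to_move
  | _ + 1, to_move, [] => to_move
  | fuel + 1, to_move, (x, y) :: rest =>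
    let np := get_nextL data x y step
    loopA data step fuel (PySem.Set.union to_move np) (PySem.Set.union rest np)

def get_all_to_move (data : List (List String)) (i : Int) (j : Int) (step : String) : List (Int × Int) :=
  let to_move := get_pairL data i j
  sortPairs (loopA data step (2 ^ (4 * data.length + 16)) to_move (PySem.Set.ofList to_move))

-- ===== PORT B =====
-- Source B's local 'pair(x, y)'
def pairB (data : List (List String)) (x : Int) (y : Int) : List (Int × Int) :=
  if PySem.List.pyGetD (PySem.List.pyGetD data x []) y "" = "[" then [(x, y), (x, y + 1)]
  else if PySem.List.pyGetD (PySem.List.pyGetD data x []) y "" = "]" then [(x, y), (x, y - 1)]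
  else []

-- Source B's recursive 'dfs(cell)' on the visited list 'acc'; fuel bounds the recursion depth
-- and is large enough for every input admitted by Pre_ (proved below)
def dfsB (data : List (List String)) (d : Int) : Nat → List (Int × Int) → (Int × Int) → List (Int × Int)
  | 0, acc, _ => acc
  | fuel + 1, acc, c =>
    if c ∈ acc then acc
    else
      let acc2 := acc ++ [c]
      if d ≠ 0 then (pairB data (c.1 + d) c.2).foldl (dfsB data d fuel) acc2
      else acc2

def get_all_to_move_alt (data : List (List String)) (i : Int) (j : Int) (step : String) : List (Int × Int) :=
  let d : Int := if step = "v" then 1 else if step = "^" then -1 else 0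
  sortPairs (PySem.Set.ofList ((pairB data i j).foldl (dfsB data d (2 * data.length + 4)) []))

-- ===== PRECONDITION & SPEC =====
-- Pre_ = a closed-form no-IndexError domain: i and j index into data, and when a push
-- ('v'/'^') starts on a box cell the grid is rectangular with box-free borders, so the
-- chase (which only reads one row up/down and one column left/right of box cells)
-- never indexes out of range; outside Pre_ Python A can raise IndexError. The border/
-- rectangularity condition is mildly conservative: it also excludes a few grids with a
-- box pair on a border whose chase happens to stop before running off the grid
-- (A and B agree there too, they are just not claimed).
def Pre_get_all_to_move (data : List (List String)) (i : Int) (j : Int) (step : String) : Prop :=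
  PySem.Raise.InRange data.length i ∧
  PySem.Raise.InRange (PySem.List.pyGetD data i []).length j ∧
  ((step = "v" ∨ step = "^") →
    (PySem.List.pyGetD (PySem.List.pyGetD data i []) j "" = "[" ∨
     PySem.List.pyGetD (PySem.List.pyGetD data i []) j "" = "]") →
    ((∀ row ∈ data, row.length = (data.headD []).length) ∧
     (∀ s ∈ data.headD [], s ≠ "[" ∧ s ≠ "]") ∧
     (∀ s ∈ data.getLastD [], s ≠ "[" ∧ s ≠ "]") ∧
     (∀ row ∈ data, (row.headD "" ≠ "[" ∧ row.headD "" ≠ "]") ∧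
                    (row.getLastD "" ≠ "[" ∧ row.getLastD "" ≠ "]"))))
instance (data : List (List String)) (i : Int) (j : Int) (step : String) : Decidable (Pre_get_all_to_move data i j step) := by
  unfold Pre_get_all_to_move
  refine @instDecidableAnd _ _ ?_ (@instDecidableAnd _ _ ?_ ?_)
  · unfold PySem.Raise.InRange; infer_instance
  · unfold PySem.Raise.InRange; infer_instance
  · infer_instance

def pvWitness_get_all_to_move : List (List String) × Int × Int × String :=
  ([["#", "#", "#", "#"], ["#", "[", "]", "#"], ["#", "[", "]", "#"], ["#", "#", "#", "#"]], 2, 1, "^")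

def Spec_get_all_to_move (data : List (List String)) (i : Int) (j : Int) (step : String) (out : List (Int × Int)) : Prop := out = get_all_to_move_alt data i j step
instance (data : List (List String)) (i : Int) (j : Int) (step : String) (out : List (Int × Int)) : Decidable (Spec_get_all_to_move data i j step out) := by unfold Spec_get_all_to_move; infer_instance

-- ===== CLAIM (what is proved, stated in full; the proofs are below) =====
def Claim_equal_get_all_to_move : Prop := ∀ (data : List (List String)) (i : Int) (j : Int) (step : String), Dom_get_all_to_move data i j step → Pre_get_all_to_move data i j step → Spec_get_all_to_move data i j step (get_all_to_move data i j step)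

-- ===== LEMMAS AND PROOFS =====

-- sortPairs of a rearrangement of the same set
lemma sortPairs_congr {l1 l2 : List (Int × Int)} (h : l1.Perm l2) : sortPairs l1 = sortPairs l2 :=
  PySem.List.sorted_eq_sorted_of_perm l1 l2 _ (fun _ _ hab => hab) h

-- the pair of box cells one row in direction d from cell c (what both programs expand)
def childPair (data : List (List String)) (d : Int) (c : Int × Int) : List (Int × Int) :=
  get_pairL data (c.1 + d) c.2

lemma pairB_eq_get_pairL (data : List (List String)) (x y : Int) :
    pairB data x y = get_pairL data x y := rfl

-- proper descendants of a cell, n pushes deep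
def koneD (data : List (List String)) (d : Int) : Nat → (Int × Int) → List (Int × Int)
  | 0, _ => []
  | n + 1, c => (childPair data d c).flatMap (fun u => u :: koneD data d n u)

lemma koneD_succ (data : List (List String)) (d : Int) (n : Nat) (c : Int × Int) :
    koneD data d (n + 1) c = (childPair data d c).flatMap (fun u => u :: koneD data d n u) := rfl

lemma mem_get_pairL {data : List (List String)} {i j : Int} {c : Int × Int}
    (h : c ∈ get_pairL data i j) : c.1 = i := by
  unfold get_pairL at h
  split_ifs at h <;> simp_all <;> rcases h with h | h <;> simp [h]

lemma length_get_pairL (data : List (List String)) (i j : Int) : (get_pairL data i j).length ≤ 2 := by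
  unfold get_pairL; split_ifs <;> simp

lemma get_pairL_of_out {data : List (List String)} {i : Int} (j : Int)
    (h : ¬ PySem.Raise.InRange data.length i) : get_pairL data i j = [] := by
  have h1 : PySem.List.pyGet? data i = none := by rw [PySem.List.pyGet?_eq_none_iff]; exact h
  have h2 : PySem.List.pyGetD data i ([] : List String) = [] := by simp [PySem.List.pyGetD, h1]
  unfold get_pairL
  rw [h2]
  simp [PySem.List.pyGetD, PySem.List.pyGet?, PySem.List.pyIdx?]

lemma childPair_of_out {data : List (List String)} {d : Int} {c : Int × Int}
    (hd : d = 1 ∨ d = -1) (h : (data.length : Int) ≤ d * c.1) : childPair data d c = [] := by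
  apply get_pairL_of_out
  rcases hd with rfl | rfl <;>
    · intro hir
      obtain ⟨h1, h2⟩ := hir
      omega

lemma get_nextL_eq_childPair_v (data : List (List String)) (x y : Int) :
    get_nextL data x y "v" = childPair data 1 (x, y) := by
  unfold get_nextL get_lowerL childPair get_pairL
  split_ifs <;> simp_all

lemma get_nextL_eq_childPair_up (data : List (List String)) (x y : Int) :
    get_nextL data x y "^" = childPair data (-1) (x, y) := by
  unfold get_nextL get_upperL childPair get_pairL
  split_ifs <;> simp_all [sub_eq_add_neg]

lemma get_nextL_of_other {data : List (List String)} {step : String}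
    (h1 : step ≠ "v") (h2 : step ≠ "^") (x y : Int) : get_nextL data x y step = [] := by
  unfold get_nextL; simp [h1, h2]

-- Set.add / Set.union facts specialised to the shapes A's loop produces
lemma add_append_of_not_mem {res nxt : List (Int × Int)} {x : Int × Int} (h : x ∉ res) :
    PySem.Set.add (res ++ nxt) x = res ++ PySem.Set.add nxt x := by
  by_cases hx : x ∈ nxt <;>
    simp [PySem.Set.add, PySem.Set.contains, h, hx]

lemma union_append_of_disjoint {res : List (Int × Int)} :
    ∀ {np nxt : List (Int × Int)}, (∀ c ∈ np, c ∉ res) →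
    PySem.Set.union (res ++ nxt) np = res ++ PySem.Set.update nxt np := by
  intro np
  induction np with
  | nil => intro nxt _; rfl
  | cons a np ih =>
    intro nxt h
    have ha : a ∉ res := h a (by simp)
    show PySem.Set.update (PySem.Set.add (res ++ nxt) a) np = _
    rw [add_append_of_not_mem ha]
    exact ih (fun c hc => h c (by simp [hc]))

-- one whole level: expand every frontier cell once
def sweep (data : List (List String)) (d : Int) (f : List (Int × Int)) (nxt : List (Int × Int)) : List (Int × Int) :=
  f.foldl (fun nxt c => PySem.Set.update nxt (childPair data d c)) nxt

lemma mem_sweep_iff {data : List (List String)} {d : Int} :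
    ∀ (f nxt : List (Int × Int)) (x : Int × Int),
      x ∈ sweep data d f nxt ↔ x ∈ nxt ∨ ∃ c ∈ f, x ∈ childPair data d c := by
  intro f
  induction f with
  | nil => intro nxt x; simp [sweep]
  | cons a f ih =>
    intro nxt x
    show x ∈ sweep data d f (PySem.Set.update nxt (childPair data d a)) ↔ _
    rw [ih, PySem.Set.mem_update]
    constructor
    · rintro ((h | h) | ⟨c, hc, h⟩)
      · exact Or.inl h
      · exact Or.inr ⟨a, by simp, h⟩
      · exact Or.inr ⟨c, by simp [hc], h⟩
    · rintro (h | ⟨c, hc, h⟩)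
      · exact Or.inl (Or.inl h)
      · rcases List.mem_cons.mp hc with rfl | hc'
        · exact Or.inl (Or.inr h)
        · exact Or.inr ⟨c, hc', h⟩

lemma pv_length_update (s xs : List (Int × Int)) :
    (PySem.Set.update s xs).length ≤ s.length + xs.length := by
  induction xs generalizing s with
  | nil => simp [PySem.Set.update]
  | cons a xs ih =>
    have h1 : (PySem.Set.add s a).length ≤ s.length + 1 := by
      by_cases ha : a ∈ s <;> simp [PySem.Set.add, PySem.Set.contains, ha]
    calc (PySem.Set.update (PySem.Set.add s a) xs).length
        ≤ (PySem.Set.add s a).length + xs.length := ih _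
      _ ≤ s.length + (xs.length + 1) := by omega

lemma length_sweep {data : List (List String)} {d : Int} :
    ∀ (f nxt : List (Int × Int)), (sweep data d f nxt).length ≤ nxt.length + 2 * f.length := by
  intro f
  induction f with
  | nil => intro nxt; simp [sweep]
  | cons a f ih =>
    intro nxt
    have h1 := pv_length_update nxt (childPair data d a)
    have h2 : (childPair data d a).length ≤ 2 := length_get_pairL data (a.1 + d) a.2
    have h3 := ih (PySem.Set.update nxt (childPair data d a))
    simp only [sweep, List.foldl_cons, List.length_cons] at h3 ⊢
    omega

lemma sweep_of_dead {data : List (List String)} {d : Int} :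
    ∀ {f : List (Int × Int)} {nxt : List (Int × Int)},
      (∀ c ∈ f, childPair data d c = []) → sweep data d f nxt = nxt := by
  intro f
  induction f with
  | nil => intro nxt _; rfl
  | cons a f ih =>
    intro nxt h
    have ha : childPair data d a = [] := h a (by simp)
    simp only [sweep, List.foldl_cons, ha]
    exact ih (fun c hc => h c (by simp [hc]))

lemma loopA_nil (data : List (List String)) (step : String) (fuel : Nat) (tm : List (Int × Int)) :
    loopA data step fuel tm [] = tm := by
  cases fuel <;> rfl

lemma loopA_dead {data : List (List String)} {step : String}
    (h1 : step ≠ "v") (h2 : step ≠ "^") :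
    ∀ (togo : List (Int × Int)) (tm : List (Int × Int)) (fuel : Nat),
      togo.length ≤ fuel → loopA data step fuel tm togo = tm := by
  intro togo
  induction togo with
  | nil => intro tm fuel _; exact loopA_nil _ _ _ _
  | cons c togo ih =>
    intro tm fuel hfu
    obtain ⟨fu, rfl⟩ : ∃ fu, fuel = fu + 1 := ⟨fuel - 1, by simp at hfu; omega⟩
    obtain ⟨x, y⟩ := c
    show loopA data step fu (PySem.Set.union tm (get_nextL data x y step))
        (PySem.Set.union togo (get_nextL data x y step)) = tm
    rw [get_nextL_of_other h1 h2]
    exact ih tm fu (by simp at hfu ⊢; omega)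

lemma nodup_loopA (data : List (List String)) (step : String) :
    ∀ (fuel : Nat) (tm togo : List (Int × Int)), tm.Nodup → (loopA data step fuel tm togo).Nodup := by
  intro fuel
  induction fuel with
  | zero => intro tm togo h; exact h
  | succ fu ih =>
    intro tm togo h
    cases togo with
    | nil => exact h
    | cons c rest =>
      obtain ⟨x, y⟩ := c
      exact ih _ _ (PySem.Set.nodup_union _ _ h)

-- one full level of A's worklist equals one 'sweep'
lemma levelA (data : List (List String)) (step : String) (d : Int) (r : Int)
    (hstep : (step = "v" ∧ d = 1) ∨ (step = "^" ∧ d = -1)) :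
    ∀ (f : List (Int × Int)) (nxt res : List (Int × Int)) (fuel : Nat),
    (∀ c ∈ f, c.1 = r) → (∀ c ∈ res, d * c.1 ≤ d * r) → (∀ c ∈ nxt, c.1 = r + d) →
    f.length ≤ fuel →
    loopA data step fuel (res ++ nxt) (f ++ nxt)
      = loopA data step (fuel - f.length) (res ++ sweep data d f nxt) (sweep data d f nxt) := by
  have hdd : d * d = 1 := by rcases hstep with ⟨_, hd⟩ | ⟨_, hd⟩ <;> subst hd <;> ring
  intro f
  induction f with
  | nil => intro nxt res fuel _ _ _ _; simp [sweep]
  | cons c f ih =>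
    intro nxt res fuel hf hres hnxt hfu
    obtain ⟨x, y⟩ := c
    obtain ⟨fu, rfl⟩ : ∃ fu, fuel = fu + 1 := ⟨fuel - 1, by simp at hfu; omega⟩
    have hxr : x = r := hf (x, y) (by simp)
    have hnp : get_nextL data x y step = childPair data d (x, y) := by
      rcases hstep with ⟨hs, hd⟩ | ⟨hs, hd⟩ <;> subst hs <;> subst hd
      · exact get_nextL_eq_childPair_v data x y
      · exact get_nextL_eq_childPair_up data x y
    have hrows : ∀ e ∈ childPair data d (x, y), e.1 = r + d := by
      intro e he
      have := mem_get_pairL he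
      simpa [hxr] using this
    have hnotres : ∀ e ∈ childPair data d (x, y), e ∉ res := by
      intro e he hmem
      have h1 : e.1 = r + d := hrows e he
      have h2 := hres e hmem
      have h3 : d * (r + d) = d * r + d * d := by ring
      rw [h1, h3, hdd] at h2
      omega
    have hnotf : ∀ e ∈ childPair data d (x, y), e ∉ f := by
      intro e he hmem
      have h1 : e.1 = r + d := hrows e he
      have h2 : e.1 = r := hf e (by simp [hmem])
      rw [h2] at h1
      omega
    show loopA data step fu
        (PySem.Set.union (res ++ nxt) (get_nextL data x y step))
        (PySem.Set.union (f ++ nxt) (get_nextL data x y step))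
      = loopA data step (fu + 1 - (f.length + 1)) (res ++ sweep data d ((x, y) :: f) nxt)
          (sweep data d ((x, y) :: f) nxt)
    rw [hnp, union_append_of_disjoint hnotres, union_append_of_disjoint hnotf]
    have hfuel : fu + 1 - (f.length + 1) = fu - f.length := by omega
    have hsw : sweep data d ((x, y) :: f) nxt
        = sweep data d f (PySem.Set.update nxt (childPair data d (x, y))) := by
      simp only [sweep, List.foldl_cons]
    rw [hfuel, hsw]
    refine ih (PySem.Set.update nxt (childPair data d (x, y))) res fu
      (fun e he => hf e (by simp [he])) hres ?_ (by simp at hfu; omega)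
    intro e he
    rcases (PySem.Set.mem_update _ _ _).mp he with h' | h'
    · exact hnxt e h'
    · exact hrows e h'

-- membership in A's loop: res plus the descendant cones of the frontier
lemma memA (data : List (List String)) (step : String) (d : Int) (M : Nat)
    (hstep : (step = "v" ∧ d = 1) ∨ (step = "^" ∧ d = -1)) :
    ∀ (n : Nat) (f res : List (Int × Int)) (r : Int) (fuel : Nat),
    (∀ c ∈ f, c.1 = r) → (∀ c ∈ res, d * c.1 ≤ d * r) →
    (data.length : Int) ≤ d * r + n → f.length * 2 ^ n ≤ M → (n + 1) * (M + 1) ≤ fuel →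
    ∀ x, x ∈ loopA data step fuel res f ↔ x ∈ res ∨ ∃ c ∈ f, x ∈ koneD data d n c := by
  have hdd : d * d = 1 := by rcases hstep with ⟨_, hd⟩ | ⟨_, hd⟩ <;> subst hd <;> ring
  have hd : d = 1 ∨ d = -1 := by rcases hstep with ⟨_, h⟩ | ⟨_, h⟩ <;> [exact Or.inl h; exact Or.inr h]
  intro n
  induction n with
  | zero =>
    intro f res r fuel hf hres hn hflen hfA x
    simp only [pow_zero, Nat.mul_one] at hflen
    simp only [Nat.zero_add, Nat.one_mul] at hfA
    have hdead : ∀ c ∈ f, childPair data d c = [] := by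
      intro c hc
      apply childPair_of_out hd
      rw [hf c hc]
      omega
    have hA := levelA data step d r hstep f [] res fuel hf hres (by simp) (by omega)
    rw [List.append_nil, List.append_nil, sweep_of_dead hdead, List.append_nil,
      loopA_nil] at hA
    rw [hA]
    simp [koneD]
  | succ n ih =>
    intro f res r fuel hf hres hn hflen hfA x
    have hlenf : f.length ≤ M := by
      have h1 : f.length ≤ f.length * 2 ^ (n + 1) :=
        Nat.le_mul_of_pos_right _ (Nat.pow_pos (by omega))
      omega
    have hA := levelA data step d r hstep f [] res fuel hf hres (by simp) (by
      have hmul0 : (n + 1 + 1) * (M + 1) = (n + 1) * (M + 1) + (M + 1) := by ring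
      omega)
    rw [List.append_nil, List.append_nil] at hA
    have hLrows : ∀ e ∈ sweep data d f [], e.1 = r + d := by
      intro e he
      rcases (mem_sweep_iff f [] e).mp he with h' | ⟨p, hp, hep⟩
      · simp at h'
      · have := mem_get_pairL hep
        rw [hf p hp] at this
        exact this
    have hlen' : (sweep data d f []).length ≤ 2 * f.length := by
      have := length_sweep (data := data) (d := d) f []
      simpa using this
    have hih := ih (sweep data d f []) (res ++ sweep data d f []) (r + d)
      (fuel - f.length)
      hLrows
      (by
        intro e he
        have h3 : d * (r + d) = d * r + d * d := by ring
        rcases List.mem_append.mp he with h' | h'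
        · have := hres e h'
          rw [h3, hdd]
          omega
        · rw [hLrows e h', h3, hdd])
      (by
        have h3 : d * (r + d) = d * r + d * d := by ring
        rw [h3, hdd]
        push_cast at hn ⊢
        omega)
      (by
        have h1 : (sweep data d f []).length * 2 ^ n
            ≤ 2 * f.length * 2 ^ n := Nat.mul_le_mul_right _ hlen'
        have h2 : 2 * f.length * 2 ^ n = f.length * 2 ^ (n + 1) := by
          rw [pow_succ]; ring
        omega)
      (by
        have hmul2 : (n + 1 + 1) * (M + 1) = (n + 1) * (M + 1) + (M + 1) := by ring
        omega)
    rw [hA, hih x, List.mem_append]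
    have hkone : ∀ c, x ∈ koneD data d (n + 1) c ↔
        ∃ u ∈ childPair data d c, x = u ∨ x ∈ koneD data d n u := by
      intro c
      rw [koneD_succ]
      simp [List.mem_flatMap]
    constructor
    · rintro ((h | h) | ⟨c, hc, h⟩)
      · exact Or.inl h
      · rcases (mem_sweep_iff f [] x).mp h with h' | ⟨p, hp, hxp⟩
        · simp at h'
        · exact Or.inr ⟨p, hp, (hkone p).mpr ⟨x, hxp, Or.inl rfl⟩⟩
      · rcases (mem_sweep_iff f [] c).mp hc with h' | ⟨p, hp, hcp⟩
        · simp at h'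
        · exact Or.inr ⟨p, hp, (hkone p).mpr ⟨c, hcp, Or.inr h⟩⟩
    · rintro (h | ⟨c, hc, h⟩)
      · exact Or.inl (Or.inl h)
      · rcases (hkone c).mp h with ⟨u, hu, rfl | hx⟩
        · exact Or.inl (Or.inr ((mem_sweep_iff f [] x).mpr (Or.inr ⟨c, hc, hu⟩)))
        · exact Or.inr ⟨u, (mem_sweep_iff f [] u).mpr (Or.inr ⟨c, hc, hu⟩), hx⟩

-- koneD is monotone in its fuel …
lemma koneD_mono (data : List (List String)) (d : Int) :
    ∀ {n m : Nat}, n ≤ m → ∀ (c : Int × Int) (x : Int × Int),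
      x ∈ koneD data d n c → x ∈ koneD data d m c := by
  intro n
  induction n with
  | zero => intro m _ c x hx; simp [koneD] at hx
  | succ n ih =>
    intro m hm c x hx
    obtain ⟨m', rfl⟩ : ∃ m', m = m' + 1 := ⟨m - 1, by omega⟩
    rw [koneD_succ] at hx ⊢
    simp only [List.mem_flatMap, List.mem_cons] at hx ⊢
    obtain ⟨u, hu, rfl | hx⟩ := hx
    · exact ⟨x, hu, Or.inl rfl⟩
    · exact ⟨u, hu, Or.inr (ih (by omega) u x hx)⟩

-- … and its membership is stable once the fuel covers the remaining grid height
lemma koneD_succ_mem (data : List (List String)) (d : Int) (hd : d = 1 ∨ d = -1) :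
    ∀ (n : Nat) (c : Int × Int), (data.length : Int) ≤ d * c.1 + n →
    ∀ x, x ∈ koneD data d (n + 1) c ↔ x ∈ koneD data d n c := by
  intro n
  induction n with
  | zero =>
    intro c hc x
    have hdead : childPair data d c = [] := childPair_of_out hd (by omega)
    rw [koneD_succ, hdead]
    simp [koneD]
  | succ n ih =>
    intro c hc x
    rw [koneD_succ, koneD_succ]
    simp only [List.mem_flatMap, List.mem_cons]
    constructor <;> rintro ⟨u, hu, rfl | hx⟩
    · exact ⟨x, hu, Or.inl rfl⟩
    · refine ⟨u, hu, Or.inr ?_⟩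
      rw [← ih u (by have := mem_get_pairL hu; rcases hd with rfl | rfl <;> simp [this] at hc ⊢ <;> omega) x]
      exact hx
    · exact ⟨x, hu, Or.inl rfl⟩
    · refine ⟨u, hu, Or.inr ?_⟩
      rw [ih u (by have := mem_get_pairL hu; rcases hd with rfl | rfl <;> simp [this] at hc ⊢ <;> omega) x]
      exact hx

lemma koneD_stable (data : List (List String)) (d : Int) (hd : d = 1 ∨ d = -1) :
    ∀ (k n : Nat) (c : Int × Int), (data.length : Int) ≤ d * c.1 + n →
    ∀ x, x ∈ koneD data d (n + k) c ↔ x ∈ koneD data d n c := by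
  intro k
  induction k with
  | zero => intro n c _ x; rfl
  | succ k ih =>
    intro n c hc x
    have h1 : n + (k + 1) = (n + k) + 1 := by omega
    rw [h1, koneD_succ_mem data d hd (n + k) c (by push_cast at hc ⊢; omega) x]
    exact ih n c hc x

lemma koneD_trans (data : List (List String)) (d : Int) :
    ∀ (n m : Nat) (c u x : Int × Int),
      u ∈ koneD data d n c → x ∈ koneD data d m u → x ∈ koneD data d (n + m) c := by
  intro n
  induction n with
  | zero => intro m c u x hu; simp [koneD] at hu
  | succ n ih =>
    intro m c u x hu hx
    rw [koneD_succ] at hu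
    simp only [List.mem_flatMap, List.mem_cons] at hu
    obtain ⟨w, hw, rfl | hu⟩ := hu
    · have h1 : n + 1 + m = (n + m) + 1 := by omega
      rw [h1, koneD_succ]
      simp only [List.mem_flatMap, List.mem_cons]
      exact ⟨u, hw, Or.inr (koneD_mono data d (show m ≤ n + m by omega) u x hx)⟩
    · have h1 : n + 1 + m = (n + m) + 1 := by omega
      rw [h1, koneD_succ]
      simp only [List.mem_flatMap, List.mem_cons]
      exact ⟨w, hw, Or.inr (ih m w u x hu hx)⟩

-- B's DFS, folded over a list of same-row cells: membership, Nodup, cone-closedness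
lemma fold_spec (data : List (List String)) (d : Int) (hd : d = 1 ∨ d = -1) :
    ∀ (m : Nat) (l : List (Int × Int)) (r : Int) (acc : List (Int × Int)),
    (∀ u ∈ l, u.1 = r) →
    -(data.length : Int) ≤ d * r →
    (data.length : Int) ≤ d * r + m →
    acc.Nodup →
    (∀ x ∈ acc, d * r ≤ d * x.1 →
      ∀ y ∈ koneD data d (2 * data.length + 2) x, y ∈ acc) →
    (∀ x, x ∈ l.foldl (dfsB data d (m + 1)) acc ↔
        x ∈ acc ∨ ∃ u ∈ l, x = u ∨ x ∈ koneD data d (2 * data.length + 2) u)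
    ∧ (l.foldl (dfsB data d (m + 1)) acc).Nodup
    ∧ (∀ x ∈ l.foldl (dfsB data d (m + 1)) acc, d * r ≤ d * x.1 →
        ∀ y ∈ koneD data d (2 * data.length + 2) x, y ∈ l.foldl (dfsB data d (m + 1)) acc) := by
  have hdd : d * d = 1 := by rcases hd with rfl | rfl <;> ring
  have hne : d ≠ 0 := by rcases hd with rfl | rfl <;> decide
  intro m
  induction m with
  | zero =>
    intro l r
    induction l with
    | nil =>
      intro acc _ _ _ hnd hcl
      exact ⟨by simp, hnd, hcl⟩
    | cons u l ihl =>
      intro acc hrows hlo hhi hnd hcl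
      have hu1 : u.1 = r := hrows u (by simp)
      have hdeadu : childPair data d u = [] :=
        childPair_of_out hd (by rw [hu1]; push_cast at hhi; omega)
      have hkone0 : ∀ x, x ∉ koneD data d (2 * data.length + 2) u := by
        intro x hx
        have hs := koneD_stable data d hd (2 * data.length + 2) 0 u
          (by rw [hu1]; push_cast at hhi ⊢; omega) x
        rw [Nat.zero_add] at hs
        rw [hs] at hx
        simp [koneD] at hx
      have hpb : pairB data (u.1 + d) u.2 = [] := hdeadu
      have hstep1 : dfsB data d (0 + 1) acc u = if u ∈ acc then acc else acc ++ [u] := by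
        by_cases hu : u ∈ acc
        · simp [dfsB, hu]
        · simp [dfsB, hu, hpb, hne]
      rw [List.foldl_cons, hstep1]
      by_cases hu : u ∈ acc
      · rw [if_pos hu]
        obtain ⟨h1, h2, h3⟩ := ihl acc (fun c hc => hrows c (by simp [hc])) hlo hhi hnd hcl
        refine ⟨?_, h2, h3⟩
        intro x
        rw [h1 x]
        constructor
        · rintro (h | ⟨c, hc, h⟩)
          · exact Or.inl h
          · exact Or.inr ⟨c, by simp [hc], h⟩
        · rintro (h | ⟨c, hc, h⟩)
          · exact Or.inl h
          · rcases List.mem_cons.mp hc with rfl | hc'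
            · rcases h with rfl | h
              · exact Or.inl hu
              · exact absurd h (hkone0 x)
            · exact Or.inr ⟨c, hc', h⟩
      · rw [if_neg hu]
        have hnd2 : (acc ++ [u]).Nodup := by
          rw [List.nodup_append]
          exact ⟨hnd, List.nodup_singleton _, by
            intro a ha b hb
            simp only [List.mem_singleton] at hb
            subst hb
            intro hEq
            exact hu (hEq ▸ ha)⟩
        have hcl2 : ∀ x ∈ acc ++ [u], d * r ≤ d * x.1 →
            ∀ y ∈ koneD data d (2 * data.length + 2) x, y ∈ acc ++ [u] := by
          intro x hx hrx y hy
          rcases List.mem_append.mp hx with hx' | hx'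
          · exact List.mem_append.mpr (Or.inl (hcl x hx' hrx y hy))
          · simp only [List.mem_singleton] at hx'
            subst hx'
            exact absurd hy (hkone0 y)
        obtain ⟨h1, h2, h3⟩ := ihl (acc ++ [u]) (fun c hc => hrows c (by simp [hc])) hlo hhi hnd2 hcl2
        refine ⟨?_, h2, h3⟩
        intro x
        rw [h1 x]
        simp only [List.mem_append, List.mem_singleton]
        constructor
        · rintro ((h | h) | ⟨c, hc, h⟩)
          · exact Or.inl h
          · exact Or.inr ⟨u, by simp, Or.inl h⟩
          · exact Or.inr ⟨c, by simp [hc], h⟩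
        · rintro (h | ⟨c, hc, h⟩)
          · exact Or.inl (Or.inl h)
          · rcases List.mem_cons.mp hc with rfl | hc'
            · rcases h with rfl | h
              · exact Or.inl (Or.inr rfl)
              · exact absurd h (hkone0 x)
            · exact Or.inr ⟨c, hc', h⟩
  | succ mk ihm =>
    intro l r
    induction l with
    | nil =>
      intro acc _ _ _ hnd hcl
      exact ⟨by simp, hnd, hcl⟩
    | cons u l ihl =>
      intro acc hrows hlo hhi hnd hcl
      have hu1 : u.1 = r := hrows u (by simp)
      have hexp : d * (r + d) = d * r + 1 := by rw [mul_add, hdd]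
      by_cases hu : u ∈ acc
      · -- already visited: its whole cone is in acc
        have hstep1 : dfsB data d (mk + 1 + 1) acc u = acc := by simp [dfsB, hu]
        rw [List.foldl_cons, hstep1]
        obtain ⟨h1, h2, h3⟩ := ihl acc (fun c hc => hrows c (by simp [hc])) hlo hhi hnd hcl
        refine ⟨?_, h2, h3⟩
        intro x
        rw [h1 x]
        constructor
        · rintro (h | ⟨c, hc, h⟩)
          · exact Or.inl h
          · exact Or.inr ⟨c, by simp [hc], h⟩
        · rintro (h | ⟨c, hc, h⟩)
          · exact Or.inl h
          · rcases List.mem_cons.mp hc with rfl | hc'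
            · rcases h with rfl | h
              · exact Or.inl hu
              · exact Or.inl (hcl c hu (by rw [hu1]) x h)
            · exact Or.inr ⟨c, hc', h⟩
      · -- new cell: add it, recurse into the pair it pushes
        have hstep1 : dfsB data d (mk + 1 + 1) acc u
            = (childPair data d u).foldl (dfsB data d (mk + 1)) (acc ++ [u]) := by
          simp only [dfsB, if_neg hu, if_pos hne]
          rfl
        have hcrows : ∀ c ∈ childPair data d u, c.1 = r + d := by
          intro c hc
          have := mem_get_pairL hc
          rw [hu1] at this
          exact this
        have hnd2 : (acc ++ [u]).Nodup := by
          rw [List.nodup_append]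
          exact ⟨hnd, List.nodup_singleton _, by
            intro a ha b hb
            simp only [List.mem_singleton] at hb
            subst hb
            intro hEq
            exact hu (hEq ▸ ha)⟩
        have hcl2 : ∀ x ∈ acc ++ [u], d * (r + d) ≤ d * x.1 →
            ∀ y ∈ koneD data d (2 * data.length + 2) x, y ∈ acc ++ [u] := by
          intro x hx hrx y hy
          rcases List.mem_append.mp hx with hx' | hx'
          · exact List.mem_append.mpr (Or.inl (hcl x hx' (by rw [hexp] at hrx; omega) y hy))
          · simp only [List.mem_singleton] at hx'
            subst hx'
            rw [hexp, hu1] at hrx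
            omega
        obtain ⟨hm1, hm2, hm3⟩ := ihm (childPair data d u) (r + d) (acc ++ [u]) hcrows
          (by rw [hexp]; omega)
          (by rw [hexp]; push_cast at hhi ⊢; omega)
          hnd2 hcl2
        -- u's cone, decomposed one level
        have hNsucc : 2 * data.length + 2 = (2 * data.length + 1) + 1 := by omega
        have hstab : ∀ c ∈ childPair data d u, ∀ x,
            x ∈ koneD data d (2 * data.length + 1) c ↔
            x ∈ koneD data d (2 * data.length + 2) c := by
          intro c hc x
          rw [hNsucc]
          exact (koneD_stable data d hd 1 (2 * data.length + 1) c
            (by rw [hcrows c hc, hexp]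
                have : -(data.length : Int) ≤ d * r := hlo
                push_cast
                omega) x).symm
        have hconeu : ∀ x, x ∈ koneD data d (2 * data.length + 2) u ↔
            ∃ c ∈ childPair data d u, x = c ∨ x ∈ koneD data d (2 * data.length + 2) c := by
          intro x
          rw [hNsucc, koneD_succ]
          simp only [List.mem_flatMap, List.mem_cons]
          constructor
          · rintro ⟨c, hc, rfl | h⟩
            · exact ⟨x, hc, Or.inl rfl⟩
            · exact ⟨c, hc, Or.inr ((hstab c hc x).mp h)⟩
          · rintro ⟨c, hc, rfl | h⟩
            · exact ⟨x, hc, Or.inl rfl⟩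
            · exact ⟨c, hc, Or.inr ((hstab c hc x).mpr h)⟩
        have hiff1 : ∀ x, x ∈ (childPair data d u).foldl (dfsB data d (mk + 1)) (acc ++ [u]) ↔
            x ∈ acc ∨ x = u ∨ x ∈ koneD data d (2 * data.length + 2) u := by
          intro x
          rw [hm1 x, hconeu x]
          simp only [List.mem_append, List.mem_singleton]
          exact or_assoc
        have hcl1 : ∀ x ∈ (childPair data d u).foldl (dfsB data d (mk + 1)) (acc ++ [u]),
            d * r ≤ d * x.1 →
            ∀ y ∈ koneD data d (2 * data.length + 2) x,
              y ∈ (childPair data d u).foldl (dfsB data d (mk + 1)) (acc ++ [u]) := by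
          intro x hx hrx y hy
          rcases (hiff1 x).mp hx with hxa | rfl | hxk
          · exact (hiff1 y).mpr (Or.inl (hcl x hxa hrx y hy))
          · exact (hiff1 y).mpr (Or.inr (Or.inr hy))
          · -- x is a strict descendant of u: y is one too
            have htr := koneD_trans data d (2 * data.length + 2) (2 * data.length + 2) u x y hxk hy
            have hyu : y ∈ koneD data d (2 * data.length + 2) u := by
              have hs := koneD_stable data d hd (2 * data.length + 2) (2 * data.length + 2) u
                (by rw [hu1]
                    have : -(data.length : Int) ≤ d * r := hlo
                    push_cast
                    omega) y
              rw [← hs]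
              exact htr
            exact (hiff1 y).mpr (Or.inr (Or.inr hyu))
        obtain ⟨hl1, hl2, hl3⟩ := ihl ((childPair data d u).foldl (dfsB data d (mk + 1)) (acc ++ [u]))
          (fun c hc => hrows c (by simp [hc])) hlo hhi hm2 hcl1
        rw [List.foldl_cons, hstep1]
        refine ⟨?_, hl2, hl3⟩
        intro x
        rw [hl1 x]
        rw [hiff1 x]
        constructor
        · rintro ((h | h | h) | ⟨c, hc, h⟩)
          · exact Or.inl h
          · exact Or.inr ⟨u, by simp, Or.inl h⟩
          · exact Or.inr ⟨u, by simp, Or.inr h⟩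
          · exact Or.inr ⟨c, by simp [hc], h⟩
        · rintro (h | ⟨c, hc, h⟩)
          · exact Or.inl (Or.inl h)
          · rcases List.mem_cons.mp hc with rfl | hc'
            · rcases h with rfl | h
              · exact Or.inl (Or.inr (Or.inl rfl))
              · exact Or.inl (Or.inr (Or.inr h))
            · exact Or.inr ⟨c, hc', h⟩

-- for a direction that is not a push, the DFS only dedups its argument list
lemma dfsB_zero (data : List (List String)) :
    ∀ (m : Nat) (l acc : List (Int × Int)),
      l.foldl (dfsB data 0 (m + 1)) acc = PySem.Set.update acc l := by
  intro m l
  induction l with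
  | nil => intro acc; rfl
  | cons c l ih =>
    intro acc
    have hstep : dfsB data 0 (m + 1) acc c = PySem.Set.add acc c := by
      by_cases hc : c ∈ acc <;>
        simp [dfsB, PySem.Set.add, PySem.Set.contains, hc]
    show l.foldl (dfsB data 0 (m + 1)) (dfsB data 0 (m + 1) acc c) = _
    rw [hstep]
    exact ih (PySem.Set.add acc c)

lemma rows_pair (i j k : Int) : ∀ c ∈ [(i, j), (i, k)], c.1 = i := by
  intro c hc
  rcases List.mem_cons.mp hc with rfl | hc'
  · rfl
  · rw [List.mem_singleton] at hc'
    subst hc'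
    rfl

lemma ofList_pair (i j k : Int) (h : j ≠ k) :
    PySem.Set.ofList [(i, j), (i, k)] = [(i, j), (i, k)] := by
  apply PySem.Set.ofList_eq_self_of_nodup
  simp [h]

-- arithmetic for the fuel bounds
lemma fuel_big (h : Nat) : (2 * h + 3) * (2 ^ (2 * h + 3) + 1) ≤ 2 ^ (4 * h + 16) := by
  have a1 : 2 * h + 3 ≤ 2 ^ (2 * h + 3) := (Nat.lt_two_pow_self).le
  have a2 : 2 ^ (2 * h + 3) + 1 ≤ 2 ^ (2 * h + 4) := by
    have : 1 ≤ 2 ^ (2 * h + 3) := Nat.one_le_two_pow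
    have : 2 ^ (2 * h + 4) = 2 ^ (2 * h + 3) + 2 ^ (2 * h + 3) := by rw [pow_succ]; ring
    omega
  calc (2 * h + 3) * (2 ^ (2 * h + 3) + 1)
      ≤ 2 ^ (2 * h + 3) * 2 ^ (2 * h + 4) := Nat.mul_le_mul a1 a2
    _ = 2 ^ (2 * h + 3 + (2 * h + 4)) := by rw [← pow_add]
    _ ≤ 2 ^ (4 * h + 16) := Nat.pow_le_pow_right (by omega) (by omega)

lemma fuel_big2 (h : Nat) : 2 * h + 4 ≤ 2 ^ (4 * h + 16) := by
  have a1 : 2 * h + 4 < 2 ^ (2 * h + 4) := Nat.lt_two_pow_self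
  have a2 : 2 ^ (2 * h + 4) ≤ 2 ^ (4 * h + 16) := Nat.pow_le_pow_right (by omega) (by omega)
  omega

-- the two programs' result lists are permutations when the push starts on a box pair
set_option maxHeartbeats 1000000 in
lemma perm_main (data : List (List String)) (i j k : Int) (step : String) (d : Int)
    (hstep : (step = "v" ∧ d = 1) ∨ (step = "^" ∧ d = -1))
    (hi : PySem.Raise.InRange data.length i) (hjk : j ≠ k) :
    (loopA data step (2 ^ (4 * data.length + 16)) [(i, j), (i, k)]
        (PySem.Set.ofList [(i, j), (i, k)])).Perm
      (PySem.Set.ofList ([(i, j), (i, k)].foldl (dfsB data d (2 * data.length + 4)) [])) := by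
  have hd : d = 1 ∨ d = -1 := by rcases hstep with ⟨_, h⟩ | ⟨_, h⟩ <;> [exact Or.inl h; exact Or.inr h]
  have hdi : -(data.length : Int) ≤ d * i := by
    obtain ⟨h1, h2⟩ := hi
    rcases hd with rfl | rfl <;> omega
  have hinit : PySem.Set.ofList [(i, j), (i, k)] = [(i, j), (i, k)] := ofList_pair i j k hjk
  have hndinit : ([(i, j), (i, k)] : List (Int × Int)).Nodup := by simp [hjk]
  -- A's members
  have hmemA := memA data step d (2 ^ (2 * data.length + 3)) hstep (2 * data.length + 2)
    [(i, j), (i, k)] [(i, j), (i, k)] i (2 ^ (4 * data.length + 16))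
    (rows_pair i j k)
    (fun c hc => by rw [rows_pair i j k c hc])
    (by push_cast; omega)
    (by
      have : (2:Nat) * 2 ^ (2 * data.length + 2) = 2 ^ (2 * data.length + 3) := by
        rw [pow_succ]; ring
      simp only [List.length_cons, List.length_nil]
      omega)
    (by
      have := fuel_big data.length
      have h4 : 2 * data.length + 2 + 1 = 2 * data.length + 3 := by omega
      rw [h4]
      exact this)
  have hndA := nodup_loopA data step (2 ^ (4 * data.length + 16))
    [(i, j), (i, k)] (PySem.Set.ofList [(i, j), (i, k)]) hndinit
  -- B's members
  have hfuelB : 2 * data.length + 4 = (2 * data.length + 3) + 1 := by omega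
  have hB := fold_spec data d hd (2 * data.length + 3) [(i, j), (i, k)] i []
    (rows_pair i j k) hdi (by push_cast; omega) (by simp) (by simp)
  rw [← hfuelB] at hB
  obtain ⟨hmemB, hndB, _⟩ := hB
  have hofB : PySem.Set.ofList ([(i, j), (i, k)].foldl (dfsB data d (2 * data.length + 4)) [])
      = [(i, j), (i, k)].foldl (dfsB data d (2 * data.length + 4)) [] :=
    PySem.Set.ofList_eq_self_of_nodup _ hndB
  rw [hinit] at hndA
  rw [hinit, hofB]
  apply List.perm_of_nodup_nodup_toFinset_eq hndA hndB
  ext x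
  simp only [List.mem_toFinset]
  rw [hmemA x, hmemB x]
  constructor
  · rintro (h | ⟨c, hc, h⟩)
    · exact Or.inr ⟨x, h, Or.inl rfl⟩
    · exact Or.inr ⟨c, hc, Or.inr h⟩
  · rintro (h | ⟨c, hc, rfl | h⟩)
    · simp at h
    · exact Or.inl hc
    · exact Or.inr ⟨c, hc, h⟩

-- ===== VERDICT (by name: the statement is the Claim_ definition above) =====
set_option maxHeartbeats 1000000 in
theorem get_all_to_move_spec : Claim_equal_get_all_to_move := by
  intro data i j step _ hpre
  obtain ⟨hi, _, _⟩ := hpre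
  show get_all_to_move data i j step = get_all_to_move_alt data i j step
  unfold get_all_to_move get_all_to_move_alt
  rw [pairB_eq_get_pairL]
  by_cases hb1 : PySem.List.pyGetD (PySem.List.pyGetD data i []) j "" = "["
  · have hpair : get_pairL data i j = [(i, j), (i, j + 1)] := by
      unfold get_pairL; simp [hb1]
    rw [hpair]
    by_cases hs1 : step = "v"
    · subst hs1
      exact sortPairs_congr (perm_main data i j (j + 1) "v" 1 (Or.inl ⟨rfl, rfl⟩) hi (by omega))
    · by_cases hs2 : step = "^"
      · subst hs2
        exact sortPairs_congr (perm_main data i j (j + 1) "^" (-1) (Or.inr ⟨rfl, rfl⟩) hi (by omega))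
      · rw [if_neg hs1, if_neg hs2]
        have hofl : PySem.Set.ofList [(i, j), (i, j + 1)] = [(i, j), (i, j + 1)] :=
          ofList_pair i j (j + 1) (by omega)
        have hdead := loopA_dead (data := data) hs1 hs2 (PySem.Set.ofList [(i, j), (i, j + 1)])
          [(i, j), (i, j + 1)] (2 ^ (4 * data.length + 16))
          (by rw [hofl]; have := fuel_big2 data.length; simp; omega)
        have hfB : 2 * data.length + 4 = (2 * data.length + 3) + 1 := by omega
        show sortPairs (loopA data step (2 ^ (4 * data.length + 16)) [(i, j), (i, j + 1)]
            (PySem.Set.ofList [(i, j), (i, j + 1)]))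
          = sortPairs (PySem.Set.ofList (([(i, j), (i, j + 1)] : List (Int × Int)).foldl
              (dfsB data 0 (2 * data.length + 4)) []))
        rw [hdead, hfB, dfsB_zero,
          show PySem.Set.update [] [(i, j), (i, j + 1)] = PySem.Set.ofList [(i, j), (i, j + 1)] from rfl,
          hofl, hofl]
  · by_cases hb2 : PySem.List.pyGetD (PySem.List.pyGetD data i []) j "" = "]"
    · have hpair : get_pairL data i j = [(i, j), (i, j - 1)] := by
        unfold get_pairL; simp [hb2]
      rw [hpair]
      by_cases hs1 : step = "v"
      · subst hs1
        exact sortPairs_congr (perm_main data i j (j - 1) "v" 1 (Or.inl ⟨rfl, rfl⟩) hi (by omega))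
      · by_cases hs2 : step = "^"
        · subst hs2
          exact sortPairs_congr (perm_main data i j (j - 1) "^" (-1) (Or.inr ⟨rfl, rfl⟩) hi (by omega))
        · rw [if_neg hs1, if_neg hs2]
          have hofl : PySem.Set.ofList [(i, j), (i, j - 1)] = [(i, j), (i, j - 1)] :=
            ofList_pair i j (j - 1) (by omega)
          have hdead := loopA_dead (data := data) hs1 hs2 (PySem.Set.ofList [(i, j), (i, j - 1)])
            [(i, j), (i, j - 1)] (2 ^ (4 * data.length + 16))
            (by rw [hofl]; have := fuel_big2 data.length; simp; omega)
          have hfB : 2 * data.length + 4 = (2 * data.length + 3) + 1 := by omega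
          show sortPairs (loopA data step (2 ^ (4 * data.length + 16)) [(i, j), (i, j - 1)]
              (PySem.Set.ofList [(i, j), (i, j - 1)]))
            = sortPairs (PySem.Set.ofList (([(i, j), (i, j - 1)] : List (Int × Int)).foldl
                (dfsB data 0 (2 * data.length + 4)) []))
          rw [hdead, hfB, dfsB_zero,
            show PySem.Set.update [] [(i, j), (i, j - 1)] = PySem.Set.ofList [(i, j), (i, j - 1)] from rfl,
            hofl, hofl]
    · have hpair : get_pairL data i j = [] := by
        unfold get_pairL; simp [hb1, hb2]
      rw [hpair]
      show sortPairs (loopA data step (2 ^ (4 * data.length + 16)) []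
          (PySem.Set.ofList ([] : List (Int × Int))))
        = sortPairs (PySem.Set.ofList (([] : List (Int × Int)).foldl
            (dfsB data (if step = "v" then 1 else if step = "^" then -1 else 0)
              (2 * data.length + 4)) []))
      rw [show PySem.Set.ofList ([] : List (Int × Int)) = [] from rfl, loopA_nil]
      rfl
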